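-- pv_equiv track=rewrite | github.com/BeatrizBL/Adventofcode_2022 | 7_No_Space_Left_On_Device/no_space_left.py | process_command_lines
-- ===== SOURCE A (Python) =====
-- def process_command_lines(input: list) -> list:
--     """Process the command lines into a list of tuples where
--     - the first element is the command
--     - and the second element is the output of each command, as a list of lines.
--     """
--     processed = {}
--     commands_ix = [i for i in range(len(input)) if input[i].startswith('$')]
--     if 0 not in commands_ix:
--         raise ValueError(f'First line is not a command - {input[0]}')
--     commands_ix = commands_ix + [len(input)]
--     processed = [(input[i],input[(i+1):j]) \
--         for i,j in zip(commands_ix[:(len(commands_ix)-1)], commands_ix[1:])]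
--     return processed
-- ===== SOURCE B (Python) =====
-- def process_command_lines(input: list) -> list:
--     """Process the command lines into a list of tuples where
--     - the first element is the command
--     - and the second element is the output of each command, as a list of lines.
--     """
--     if not input[0].startswith('$'):
--         raise ValueError(f'First line is not a command - {input[0]}')
--     result = []
--     for line in input:
--         if line.startswith('$'):
--             result.append((line, []))
--         else:
--             result[-1][1].append(line)
--     return result
-- ===== Notes on version B (the rewrite author's own statement) =====
-- stated objective: simpler
-- what changed: Replaced the index arithmetic (collect command positions, zip consecutive positions, slice) by a single forward pass that appends a new (command, []) tuple on a '$' line and otherwise appends the line to the last tuple's list; the leading guard is kept so exceptions on empty/bad-first-line input are identical.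
import Mathlib
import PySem

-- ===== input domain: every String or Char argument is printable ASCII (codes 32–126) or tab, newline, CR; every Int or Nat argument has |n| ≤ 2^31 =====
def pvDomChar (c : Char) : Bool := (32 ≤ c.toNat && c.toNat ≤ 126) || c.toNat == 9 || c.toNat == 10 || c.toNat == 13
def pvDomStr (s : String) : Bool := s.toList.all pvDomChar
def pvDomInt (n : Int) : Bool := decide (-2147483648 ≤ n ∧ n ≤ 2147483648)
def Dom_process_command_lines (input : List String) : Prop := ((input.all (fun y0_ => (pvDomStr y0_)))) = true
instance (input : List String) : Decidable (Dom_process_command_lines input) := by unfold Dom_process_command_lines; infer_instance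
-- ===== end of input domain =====

-- B replaces A's collect-command-indices / zip-consecutive / slice scheme by one forward pass
-- that starts a new (command, []) group on each '$' line and appends other lines to the last group.

-- ===== PORT A =====
def process_command_lines (input : List String) : List (String × List String) :=
  let n : Int := (input.length : Int)
  let commands_ix : List Int :=
    (PySem.List.pyRange 0 n 1).filter
      (fun i => PySem.Str.startswith (PySem.List.pyGetD input i "") "$")
  if (0 : Int) ∈ commands_ix then
    let cix2 : List Int := commands_ix ++ [n]
    (List.zip (PySem.List.slice cix2 none (some ((cix2.length : Int) - 1)))
              (PySem.List.slice cix2 (some 1) none)).map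
      (fun p => (PySem.List.pyGetD input p.1 "",
                 PySem.List.slice input (some (p.1 + 1)) (some p.2)))
  else []  -- Python raises ValueError here (excluded by Pre_)

-- ===== PORT B =====
def pcStep (acc : List (String × List String)) (line : String) : List (String × List String) :=
  if PySem.Str.startswith line "$" then acc ++ [(line, [])]
  else
    match acc.getLast? with
    | some (c, out) => acc.dropLast ++ [(c, out ++ [line])]  -- result[-1][1].append(line)
    | none => acc  -- Python: IndexError; unreachable under B's leading guard

def process_command_lines_alt (input : List String) : List (String × List String) :=
  match PySem.List.pyGet? input 0 with
  | none => []  -- input[0]: IndexError on empty input (excluded by Pre_)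
  | some first =>
    if ¬ PySem.Str.startswith first "$" then []  -- Python raises ValueError (excluded by Pre_)
    else input.foldl pcStep []

-- ===== PRECONDITION & SPEC =====
-- Pre_ excludes exactly the inputs on which A raises: the empty list (IndexError) and
-- inputs whose first line does not start with '$' (ValueError); B raises there identically.
def Pre_process_command_lines (input : List String) : Prop :=
  input ≠ [] ∧ PySem.Str.startswith (input.headD "") "$" = true
instance (input : List String) : Decidable (Pre_process_command_lines input) := by
  unfold Pre_process_command_lines; infer_instance
def pvWitness_process_command_lines : List String := ["$ ls", "a.txt", "dir b", "$ cd b", "$ ls", "c"]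

def Spec_process_command_lines (input : List String) (out : List (String × List String)) : Prop := out = process_command_lines_alt input
instance (input : List String) (out : List (String × List String)) : Decidable (Spec_process_command_lines input out) := by unfold Spec_process_command_lines; infer_instance

-- ===== CLAIM (what is proved, stated in full; the proofs are below) =====
def Claim_equal_process_command_lines : Prop := ∀ (input : List String), Dom_process_command_lines input → Pre_process_command_lines input → Spec_process_command_lines input (process_command_lines input)

-- ===== LEMMAS AND PROOFS =====

def pcIsCmd (s : String) : Bool := PySem.Str.startswith s "$"

-- canonical grouping both ports are proved equal to
def pcGroups : List String → List (String × List String)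
  | [] => []
  | x :: rest =>
    (x, rest.takeWhile (fun l => !pcIsCmd l)) :: pcGroups (rest.dropWhile (fun l => !pcIsCmd l))
  termination_by xs => xs.length
  decreasing_by
    simp only [List.length_cons]
    exact Nat.lt_succ_of_le (List.length_dropWhile_le _ _)

-- Nat-level core of port A
def pcCixN (xs : List String) : List Nat :=
  (List.range xs.length).filter (fun i => pcIsCmd (xs.getD i ""))

def pcAcoreN (xs : List String) : List (String × List String) :=
  let L := pcCixN xs ++ [xs.length]
  (List.zip L.dropLast L.tail).map
    (fun p => (xs.getD p.1 "", (xs.drop (p.1 + 1)).take (p.2 - (p.1 + 1))))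

-- ---- B = pcGroups ----

theorem pcDropWhile_head (p : String → Bool) : ∀ (l : List String) (z : String)
    (zs' : List String), l.dropWhile p = z :: zs' → p z = false := by
  intro l
  induction l with
  | nil => intro z zs' h; simp [List.dropWhile] at h
  | cons a l ih =>
    intro z zs' h
    by_cases hp : p a = true
    · rw [List.dropWhile_cons_of_pos hp] at h; exact ih _ _ h
    · simp only [Bool.not_eq_true] at hp
      rw [List.dropWhile_cons_of_neg (by simp [hp])] at h
      cases h; exact hp

theorem pcStep_run (ys : List String) : ∀ (acc : List (String × List String)) (c : String)
    (out : List String), (∀ y ∈ ys, pcIsCmd y = false) →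
    List.foldl pcStep (acc ++ [(c, out)]) ys = acc ++ [(c, out ++ ys)] := by
  induction ys with
  | nil => intro acc c out _; simp
  | cons y ys ih =>
    intro acc c out h
    have hy : pcIsCmd y = false := h y (by simp)
    simp only [List.foldl_cons]
    have : pcStep (acc ++ [(c, out)]) y = acc ++ [(c, out ++ [y])] := by
      simp [pcStep, pcIsCmd] at hy ⊢
      simp [hy]
    rw [this, ih _ _ _ (fun z hz => h z (by simp [hz]))]
    simp

theorem pcStep_prefix (zs : List String) : ∀ (acc a' : List (String × List String)), a' ≠ [] →
    List.foldl pcStep (acc ++ a') zs = acc ++ List.foldl pcStep a' zs := by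
  induction zs with
  | nil => intro acc a' _; simp
  | cons z zs ih =>
    intro acc a' ha
    simp only [List.foldl_cons]
    by_cases hz : pcIsCmd z = true
    · have h1 : pcStep (acc ++ a') z = acc ++ (a' ++ [(z, [])]) := by
        simp [pcStep, pcIsCmd] at hz ⊢; simp [hz]
      have h2 : pcStep a' z = a' ++ [(z, [])] := by
        simp [pcStep, pcIsCmd] at hz ⊢; simp [hz]
      rw [h1, h2, ih _ _ (by simp)]
    · simp only [Bool.not_eq_true] at hz
      have hz' : PySem.Chars.startswith z.toList ['$'] = false := by
        have : PySem.Str.startswith z "$" = false := hz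
        simpa [PySem.Str.startswith] using this
      obtain ⟨⟨c, out⟩, hp⟩ := Option.isSome_iff_exists.mp (List.getLast?_isSome.mpr ha)
      have h2 : pcStep a' z = a'.dropLast ++ [(c, out ++ [z])] := by
        unfold pcStep
        rw [if_neg (by simp [hz']), hp]
      have h1 : pcStep (acc ++ a') z = acc ++ (a'.dropLast ++ [(c, out ++ [z])]) := by
        unfold pcStep
        rw [if_neg (by simp [hz']), List.getLast?_append_of_ne_nil _ ha, hp,
            List.dropLast_append_of_ne_nil ha]
        simp
      rw [h1, h2, ih _ _ (by simp)]

theorem pcFold_eq_groups : ∀ (n : Nat) (xs : List String), xs.length ≤ n → ∀ x rest,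
    xs = x :: rest → pcIsCmd x = true → List.foldl pcStep [] xs = pcGroups xs := by
  intro n
  induction n with
  | zero => intro xs h x rest hx; subst hx; simp at h
  | succ n ih =>
    intro xs hlen x rest hx hcmd
    subst hx
    have hsplit := List.takeWhile_append_dropWhile (p := fun l => !pcIsCmd l) (l := rest)
    set ys := rest.takeWhile (fun l => !pcIsCmd l) with hys
    set zs := rest.dropWhile (fun l => !pcIsCmd l) with hzs
    have hstep : pcStep [] x = [(x, [])] := by
      simp [pcStep, pcIsCmd] at hcmd ⊢; simp [hcmd]
    have hys_prop : ∀ y ∈ ys, pcIsCmd y = false := by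
      intro y hy
      have := List.mem_takeWhile_imp hy
      simpa using this
    have h1 : List.foldl pcStep [] (x :: rest) = List.foldl pcStep [(x, ys)] zs := by
      simp only [List.foldl_cons, hstep]
      rw [← hsplit, List.foldl_append]
      have h2 : List.foldl pcStep [(x, [])] ys = [(x, ys)] := by
        simpa using pcStep_run ys [] x [] hys_prop
      rw [h2]
    rw [h1]
    rw [pcGroups]
    rw [← hys, ← hzs]
    cases hz : zs with
    | nil => simp [pcGroups]
    | cons z zs' =>
      have hzcmd : pcIsCmd z = true := by
        have hd : rest.dropWhile (fun l => !pcIsCmd l) = z :: zs' := by rw [← hzs, hz]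
        have := pcDropWhile_head (fun l => !pcIsCmd l) rest z zs' hd
        simpa using this
      have hstepz : pcStep [(x, ys)] z = [(x, ys)] ++ [(z, [])] := by
        simp [pcStep, pcIsCmd] at hzcmd ⊢; simp [hzcmd]
      simp only [List.foldl_cons, hstepz]
      rw [pcStep_prefix zs' [(x, ys)] [(z, [])] (by simp)]
      have hlen' : (z :: zs').length ≤ n := by
        have : zs.length ≤ rest.length := by
          rw [hzs]; exact List.length_dropWhile_le _ _
        rw [hz] at this
        simp only [List.length_cons] at hlen
        omega
      have hstep0 : pcStep [] z = [(z, [])] := by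
        simp [pcStep, pcIsCmd] at hzcmd ⊢; simp [hzcmd]
      have hind := ih (z :: zs') hlen' z zs' rfl hzcmd
      simp only [List.foldl_cons, hstep0] at hind
      rw [hind]
      simp

-- ---- A = pcAcoreN (bridging the Int/PySem layer) ----

theorem pcCix_cast (xs : List String) :
    (PySem.List.pyRange 0 (xs.length : Int) 1).filter
      (fun i => PySem.Str.startswith (PySem.List.pyGetD xs i "") "$")
    = (pcCixN xs).map (fun (k : Nat) => (k : Int)) := by
  rw [PySem.List.pyRange_one]
  simp only [sub_zero, Int.toNat_natCast, zero_add]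
  rw [List.filter_map]
  unfold pcCixN pcIsCmd
  refine congrArg _ (List.filter_congr ?_)
  intro i _
  simp [Function.comp, PySem.List.pyGetD_natCast]

theorem pcSlices (C : List Nat) (n : Nat) :
    (List.zip (PySem.List.slice (C.map (fun (k : Nat) => (k : Int)) ++ [(n : Int)]) none
                (some ((((C.map (fun (k : Nat) => (k : Int)) ++ [(n : Int)]).length : Nat) : Int) - 1)))
              (PySem.List.slice (C.map (fun (k : Nat) => (k : Int)) ++ [(n : Int)]) (some 1) none))
    = (List.zip (C ++ [n]).dropLast (C ++ [n]).tail).map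
        (Prod.map (fun (k : Nat) => (k : Int)) (fun (k : Nat) => (k : Int))) := by
  have hmap : C.map (fun (k : Nat) => (k : Int)) ++ [(n : Int)]
      = (C ++ [n]).map (fun (k : Nat) => (k : Int)) := by simp
  rw [hmap]
  have hlen : ((((C ++ [n]).map (fun (k : Nat) => (k : Int))).length : Nat) : Int)
      - 1 = ((C.length : Nat) : Int) := by simp
  rw [hlen, PySem.List.slice_to_natCast, PySem.List.slice_from_one,
      ← List.map_take, ← List.map_tail, List.zip_map]
  congr 2
  rw [List.dropLast_eq_take]
  simp

theorem pcA_eq_AcoreN (xs : List String) (h0 : (0 : Nat) ∈ pcCixN xs) :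
    process_command_lines xs = pcAcoreN xs := by
  simp only [process_command_lines]
  rw [pcCix_cast]
  have hmem : (0 : Int) ∈ (pcCixN xs).map (fun (k : Nat) => (k : Int)) :=
    List.mem_map.mpr ⟨0, h0, rfl⟩
  rw [if_pos hmem]
  rw [pcSlices (pcCixN xs) xs.length, List.map_map]
  unfold pcAcoreN
  refine List.map_congr_left ?_
  intro p _
  obtain ⟨i, j⟩ := p
  simp only [Function.comp, Prod.map]
  have hcast : ((i : Int) + 1) = (((i + 1 : Nat) : Nat) : Int) := by push_cast; ring
  rw [hcast, PySem.List.slice_natCast]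
  simp [PySem.List.pyGetD_natCast]

-- ---- pcAcoreN = pcGroups ----

theorem pcCixN_cons (x : String) (rest : List String) :
    pcCixN (x :: rest)
      = (if pcIsCmd x then [0] else []) ++ (pcCixN rest).map (· + 1) := by
  unfold pcCixN
  rw [List.length_cons, List.range_succ_eq_map, List.filter_cons, List.filter_map]
  have h1 : (x :: rest).getD 0 "" = x := rfl
  rw [h1]
  have h2 : List.filter ((fun i => pcIsCmd ((x :: rest).getD i "")) ∘ Nat.succ) (List.range rest.length)
      = List.filter (fun i => pcIsCmd (rest.getD i "")) (List.range rest.length) := by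
    refine List.filter_congr ?_
    intro i _
    simp [Function.comp]
  rw [h2]
  have h3 : (List.map Nat.succ (List.filter (fun i => pcIsCmd (rest.getD i "")) (List.range rest.length)))
      = (List.filter (fun i => pcIsCmd (rest.getD i "")) (List.range rest.length)).map (· + 1) := by
    refine List.map_congr_left ?_
    intro i _
    omega
  rw [h3]
  by_cases hx : pcIsCmd x <;> simp [hx]

theorem pcCixN_run (ys : List String) : ∀ (zs : List String),
    (∀ y ∈ ys, pcIsCmd y = false) →
    pcCixN (ys ++ zs) = (pcCixN zs).map (· + ys.length) := by
  induction ys with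
  | nil => intro zs _; simp
  | cons y ys ih =>
    intro zs h
    have hy : pcIsCmd y = false := h y (by simp)
    rw [List.cons_append, pcCixN_cons, hy]
    rw [ih zs (fun z hz => h z (by simp [hz]))]
    simp only [Bool.false_eq_true, if_false, List.nil_append, List.map_map, List.length_cons]
    refine List.map_congr_left ?_
    intro i _
    simp [Function.comp]
    omega

theorem pcAcore_eq_groups : ∀ (n : Nat) (xs : List String), xs.length ≤ n → ∀ x rest,
    xs = x :: rest → pcIsCmd x = true → pcAcoreN xs = pcGroups xs := by
  intro n
  induction n with
  | zero => intro xs h x rest hx; subst hx; simp at h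
  | succ n ih =>
    intro xs hlen x rest hx hcmd
    subst hx
    have hsplit := List.takeWhile_append_dropWhile (p := fun l => !pcIsCmd l) (l := rest)
    set ys := rest.takeWhile (fun l => !pcIsCmd l) with hys
    set zs := rest.dropWhile (fun l => !pcIsCmd l) with hzs
    have hys_prop : ∀ y ∈ ys, pcIsCmd y = false := by
      intro y hy
      have := List.mem_takeWhile_imp hy
      simpa using this
    have hcix : pcCixN (x :: rest) = 0 :: (pcCixN zs).map (· + (ys.length + 1)) := by
      rw [pcCixN_cons, hcmd, if_pos rfl, ← hsplit, pcCixN_run ys zs hys_prop]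
      simp only [List.map_map, List.singleton_append]
      congr 1
    have hlenxs : (x :: rest).length = zs.length + (ys.length + 1) := by
      have : rest.length = ys.length + zs.length := by
        rw [← hsplit]; simp
      simp [this]; omega
    rw [pcGroups, ← hys, ← hzs]
    cases hz : zs with
    | nil =>
      -- no further command: a single group containing all of rest
      have hrest : rest = ys := by rw [← hsplit, hz]; simp
      have hcix0 : pcCixN (x :: rest) = [0] := by
        rw [hcix, hz]; simp [pcCixN]
      unfold pcAcoreN
      rw [hcix0]
      simp [pcGroups, hrest]
    | cons z zs' =>
      have hzcmd : pcIsCmd z = true := by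
        have hd : rest.dropWhile (fun l => !pcIsCmd l) = z :: zs' := by rw [← hzs, hz]
        have := pcDropWhile_head (fun l => !pcIsCmd l) rest z zs' hd
        simpa using this
      -- head of pcCixN zs is 0
      have hcixzs : pcCixN zs = 0 :: (pcCixN zs').map (· + 1) := by
        rw [hz, pcCixN_cons, hzcmd, if_pos rfl, List.singleton_append]
      have hlen' : zs.length ≤ n := by
        have h1 : zs.length ≤ rest.length := by
          rw [hzs]; exact List.length_dropWhile_le _ _
        simp only [List.length_cons] at hlen
        omega
      have hIH : pcAcoreN zs = pcGroups zs := by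
        rw [hz] at hlen' ⊢
        exact ih (z :: zs') hlen' z zs' rfl hzcmd
      -- main computation
      have hL : pcCixN (x :: rest) ++ [(x :: rest).length]
          = 0 :: ((pcCixN zs ++ [zs.length]).map (· + (ys.length + 1))) := by
        rw [hcix, hlenxs]
        simp
      have hM : (pcCixN zs ++ [zs.length]).map (· + (ys.length + 1))
          = (ys.length + 1) ::
            (((pcCixN zs').map (· + 1) ++ [zs.length]).map (· + (ys.length + 1))) := by
        rw [hcixzs]
        simp
      rw [← hz, ← hIH]
      simp only [pcAcoreN]
      rw [hL, hM, List.dropLast_cons₂, List.tail_cons, List.zip_cons_cons, ← hM]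
      have hdl : ((pcCixN zs ++ [zs.length]).map (· + (ys.length + 1))).dropLast
          = ((pcCixN zs ++ [zs.length]).dropLast).map (· + (ys.length + 1)) :=
        List.map_dropLast.symm
      have htl : ((pcCixN zs').map (· + 1) ++ [zs.length]).map (· + (ys.length + 1))
          = ((pcCixN zs ++ [zs.length]).tail).map (· + (ys.length + 1)) := by
        rw [hcixzs]
        simp
      rw [hdl, htl, List.zip_map, List.map_cons, List.map_map]
      rw [← hsplit]
      congr 1
      · simp
      · refine List.map_congr_left ?_
        intro p _
        obtain ⟨i, j⟩ := p
        simp only [Function.comp_apply, Prod.map_apply]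
        have e3 : (j + (ys.length + 1)) - (i + (ys.length + 1) + 1) = j - (i + 1) := by omega
        have e2 : i + (ys.length + 1) + 1 = (ys.length + (i + 1)) + 1 := by omega
        have e1 : i + (ys.length + 1) = (ys.length + i) + 1 := by omega
        rw [e3, e2, e1, List.getD_cons_succ, List.drop_succ_cons,
            List.drop_length_add_append, List.getD_append_right ys zs _ _ (by omega)]
        simp

-- ===== VERDICT (by name: the statement is the Claim_ definition above) =====
theorem process_command_lines_spec : Claim_equal_process_command_lines := by
  intro input _ hpre
  obtain ⟨hne, hc⟩ := hpre
  unfold Spec_process_command_lines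
  obtain ⟨x, rest, rfl⟩ := List.exists_cons_of_ne_nil hne
  have hc' : pcIsCmd x = true := by simpa [pcIsCmd] using hc
  have h0 : (0 : Nat) ∈ pcCixN (x :: rest) := by
    rw [pcCixN_cons, hc']
    simp
  have hA : process_command_lines (x :: rest) = pcGroups (x :: rest) := by
    rw [pcA_eq_AcoreN _ h0]
    exact pcAcore_eq_groups (x :: rest).length _ le_rfl x rest rfl hc'
  have hB : process_command_lines_alt (x :: rest) = pcGroups (x :: rest) := by
    have hred : process_command_lines_alt (x :: rest)
        = if ¬ PySem.Str.startswith x "$" = true then []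
          else List.foldl pcStep [] (x :: rest) := by
      unfold process_command_lines_alt
      rw [PySem.List.pyGet?_zero_cons]
    rw [hred, if_neg (by simp [pcIsCmd] at hc'; simp [hc'])]
    exact pcFold_eq_groups (x :: rest).length _ le_rfl x rest rfl hc'
  rw [hA, hB]
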